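-- pv_equiv track=rewrite | github.com/hiddenduck/University | bachelor's/LA2/Treino2/Continente.py | bfs
-- ===== SOURCE A (Python) =====
-- def bfs(o, vizinhos):
--     vis = {o}
--     queue = [o]
--     while queue:
--         v = queue.pop(0)
--         for vizinho in vizinhos:
--             if v in vizinho:
--                 for country in vizinho:
--                     if country not in vis:
--                         vis.add(country)
--                         queue.append(country)
--
--     return len(vis)
-- ===== SOURCE B (Python) =====
-- def bfs(o, vizinhos):
--     # Round-based saturation: repeatedly absorb every group touching the
--     # current set; len(vizinhos) rounds always suffice (each growing round
--     # fully absorbs at least one new group), stop early at a fixpoint.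
--     vis = {o}
--     for _ in range(len(vizinhos)):
--         novo = set(vis)
--         for g in vizinhos:
--             if vis & set(g):
--                 novo |= set(g)
--         if len(novo) == len(vis):
--             break
--         vis = novo
--     return len(vis)
-- ===== Notes on version B (the rewrite author's own statement) =====
-- stated objective: alternative
-- what changed: Replaced the node-by-node worklist BFS (pop a vertex, scan all groups for it, enqueue new members) by a round-based saturation: at most len(vizinhos) pure rounds, each absorbing every group that touches the current set, with an early stop at the fixpoint.
import Mathlib
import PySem

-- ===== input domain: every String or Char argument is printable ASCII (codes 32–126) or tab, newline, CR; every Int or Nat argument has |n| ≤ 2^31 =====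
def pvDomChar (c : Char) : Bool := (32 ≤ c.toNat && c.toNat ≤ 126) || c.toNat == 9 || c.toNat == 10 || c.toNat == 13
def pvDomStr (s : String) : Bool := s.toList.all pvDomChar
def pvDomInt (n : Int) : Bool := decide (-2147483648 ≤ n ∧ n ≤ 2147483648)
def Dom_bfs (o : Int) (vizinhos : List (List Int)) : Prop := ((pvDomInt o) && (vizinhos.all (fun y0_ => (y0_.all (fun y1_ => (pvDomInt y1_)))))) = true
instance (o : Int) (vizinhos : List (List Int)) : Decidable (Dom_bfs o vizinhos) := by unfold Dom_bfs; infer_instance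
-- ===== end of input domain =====

-- B replaces A's node-by-node worklist BFS by round-based saturation over the groups
-- (at most len(vizinhos) pure rounds, early stop at the fixpoint): an alternative
-- algorithm of similar cost, not claimed faster.

-- ===== PORT A =====
-- inner 'for country in vizinho: if country not in vis: vis.add; queue.append'
def bfsInner (st : PySem.Set Int × List Int) (g : List Int) : PySem.Set Int × List Int :=
  g.foldl (fun st c => if c ∈ st.1 then st else (PySem.Set.add st.1 c, st.2 ++ [c])) st

-- 'for vizinho in vizinhos: if v in vizinho: …'
def bfsScan (vizinhos : List (List Int)) (v : Int) (st : PySem.Set Int × List Int) :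
    PySem.Set Int × List Int :=
  vizinhos.foldl (fun st g => if v ∈ g then bfsInner st g else st) st

-- 'while queue: v = queue.pop(0); …'; the fuel only makes the loop total
-- (one unit per iteration; the chosen fuel is proved sufficient below)
def bfsLoop (vizinhos : List (List Int)) : Nat → PySem.Set Int × List Int → PySem.Set Int
  | 0, st => st.1
  | fuel + 1, (vis, queue) =>
    match queue with
    | [] => vis
    | v :: rest => bfsLoop vizinhos fuel (bfsScan vizinhos v (vis, rest))

def bfs (o : Int) (vizinhos : List (List Int)) : Int :=
  PySem.Set.len
    (bfsLoop vizinhos (vizinhos.flatten.length + 1) (PySem.Set.ofList [o], [o]))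

-- ===== PORT B =====
-- one round: 'novo = set(vis); for g in vizinhos: if vis & set(g): novo |= set(g)'
def bfsRound (vizinhos : List (List Int)) (vis : PySem.Set Int) : PySem.Set Int :=
  vizinhos.foldl
    (fun novo g =>
      if PySem.Set.inter vis (PySem.Set.ofList g) = [] then novo
      else PySem.Set.union novo (PySem.Set.ofList g))
    (PySem.Set.ofList vis)

-- 'for _ in range(len(vizinhos)): … if len(novo) == len(vis): break; vis = novo'
def bfsAltLoop (vizinhos : List (List Int)) : Nat → PySem.Set Int → PySem.Set Int
  | 0, vis => vis
  | k + 1, vis =>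
    let novo := bfsRound vizinhos vis
    if PySem.Set.len novo = PySem.Set.len vis then vis
    else bfsAltLoop vizinhos k novo

def bfs_alt (o : Int) (vizinhos : List (List Int)) : Int :=
  PySem.Set.len (bfsAltLoop vizinhos vizinhos.length (PySem.Set.ofList [o]))

-- ===== PRECONDITION & SPEC =====
def Spec_bfs (o : Int) (vizinhos : List (List Int)) (out : Int) : Prop := out = bfs_alt o vizinhos
instance (o : Int) (vizinhos : List (List Int)) (out : Int) : Decidable (Spec_bfs o vizinhos out) := by unfold Spec_bfs; infer_instance

-- ===== CLAIM (what is proved, stated in full; the proofs are below) =====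
def Claim_equal_bfs : Prop := ∀ (o : Int) (vizinhos : List (List Int)), Dom_bfs o vizinhos → Spec_bfs o vizinhos (bfs o vizinhos)

-- ===== LEMMAS AND PROOFS =====

-- S is closed under the groups: any group touching S lies inside S
def pvClosed (vz : List (List Int)) (S : List Int) : Prop :=
  ∀ g ∈ vz, (∃ x, x ∈ g ∧ x ∈ S) → ∀ c ∈ g, c ∈ S

-- number of universe elements not yet visited (termination measure for A's loop)
def pvMissing (U : List Int) (vis : List Int) : Nat :=
  U.countP (fun x => !decide (x ∈ vis))

theorem pvMissing_add {U vis : List Int} {c : Int} (hU : U.Nodup) (hc : c ∈ U)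
    (hv : c ∉ vis) : pvMissing U (PySem.Set.add vis c) + 1 = pvMissing U vis := by
  rw [PySem.Set.add_of_not_mem hv]
  induction U with
  | nil => cases hc
  | cons a U ih =>
    rcases List.nodup_cons.mp hU with ⟨ha, hU'⟩
    by_cases hac : a = c
    · subst hac
      have h1 : (List.countP (fun x => !decide (x ∈ vis ++ [a])) U)
          = List.countP (fun x => !decide (x ∈ vis)) U := by
        apply List.countP_congr
        intro x hx
        have hxa : x ≠ a := fun h => ha (h ▸ hx)
        simp [List.mem_append, hxa]
      simp only [pvMissing, List.countP_cons, h1]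
      simp [hv]
    · have hcU : c ∈ U := by
        rcases List.mem_cons.mp hc with h | h
        · exact absurd h.symm hac
        · exact h
      have hih := ih hU' hcU
      simp only [pvMissing, List.countP_cons] at hih ⊢
      have h2 : (decide (a ∈ vis ++ [c]) : Bool) = decide (a ∈ vis) := by
        simp [List.mem_append, hac]
      rw [h2]
      omega

theorem bfsInner_cons (st : PySem.Set Int × List Int) (c : Int) (g : List Int) :
    bfsInner st (c :: g)
      = bfsInner (if c ∈ st.1 then st else (PySem.Set.add st.1 c, st.2 ++ [c])) g := by
  simp only [bfsInner, List.foldl_cons]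

theorem inner_mono (g : List Int) : ∀ (s : PySem.Set Int) (t : List Int) (x : Int),
    x ∈ s → x ∈ (bfsInner (s, t) g).1 := by
  induction g with
  | nil => intro s t x hx; simpa [bfsInner] using hx
  | cons c g ih =>
    intro s t x hx
    rw [bfsInner_cons]
    by_cases hc : c ∈ s
    · simpa [hc] using ih s t x hx
    · simpa [hc] using ih _ _ x ((PySem.Set.mem_add s c x).mpr (Or.inl hx))

theorem inner_queue_ext (g : List Int) : ∀ (s : PySem.Set Int) (t : List Int),
    ∃ d, (bfsInner (s, t) g).2 = t ++ d := by
  induction g with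
  | nil => intro s t; exact ⟨[], by simp [bfsInner]⟩
  | cons c g ih =>
    intro s t
    rw [bfsInner_cons]
    by_cases hc : c ∈ s
    · simpa [hc] using ih s t
    · rcases ih (PySem.Set.add s c) (t ++ [c]) with ⟨d, hd⟩
      exact ⟨[c] ++ d, by simpa [hc] using hd⟩

theorem inner_complete (g : List Int) : ∀ (s : PySem.Set Int) (t : List Int) (c : Int),
    c ∈ g → c ∈ (bfsInner (s, t) g).1 := by
  induction g with
  | nil => intro s t c hc; cases hc
  | cons a g ih =>
    intro s t c hc
    rw [bfsInner_cons]
    by_cases ha : a ∈ s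
    · rcases List.mem_cons.mp hc with rfl | hc
      · simpa [ha] using inner_mono g s t c ha
      · simpa [ha] using ih s t c hc
    · rcases List.mem_cons.mp hc with rfl | hc
      · simpa [ha] using
          inner_mono g _ _ c ((PySem.Set.mem_add s c c).mpr (Or.inr rfl))
      · simpa [ha] using ih _ _ c hc

theorem inner_new_in_queue (g : List Int) : ∀ (s : PySem.Set Int) (t : List Int) (x : Int),
    x ∈ (bfsInner (s, t) g).1 → x ∈ s ∨ x ∈ (bfsInner (s, t) g).2 := by
  induction g with
  | nil => intro s t x hx; exact Or.inl (by simpa [bfsInner] using hx)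
  | cons c g ih =>
    intro s t x hx
    rw [bfsInner_cons] at hx ⊢
    by_cases hc : c ∈ s
    · simpa [hc] using ih s t x (by simpa [hc] using hx)
    · simp only [hc, if_false] at hx ⊢
      rcases ih _ _ x hx with h | h
      · rcases (PySem.Set.mem_add s c x).mp h with h' | rfl
        · exact Or.inl h'
        · right
          rcases inner_queue_ext g (PySem.Set.add s x) (t ++ [x]) with ⟨d, hd⟩
          rw [hd]; simp
      · exact Or.inr h

theorem inner_queue_sub (g : List Int) : ∀ (s : PySem.Set Int) (t : List Int),
    (∀ x ∈ t, x ∈ s) → ∀ x ∈ (bfsInner (s, t) g).2, x ∈ (bfsInner (s, t) g).1 := by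
  induction g with
  | nil => intro s t h x hx; exact h x (by simpa [bfsInner] using hx)
  | cons c g ih =>
    intro s t h x hx
    rw [bfsInner_cons] at hx ⊢
    by_cases hc : c ∈ s
    · simp only [hc, if_true] at hx ⊢; exact ih s t h x hx
    · simp only [hc, if_false] at hx ⊢
      refine ih _ _ ?_ x hx
      intro y hy
      rcases List.mem_append.mp hy with hy | hy
      · exact (PySem.Set.mem_add s c y).mpr (Or.inl (h y hy))
      · exact (PySem.Set.mem_add s c y).mpr (Or.inr (List.mem_singleton.mp hy))

theorem inner_sound (g : List Int) : ∀ (s : PySem.Set Int) (t : List Int) (S : List Int),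
    (∀ c ∈ g, c ∈ S) → (∀ x ∈ s, x ∈ S) → ∀ x ∈ (bfsInner (s, t) g).1, x ∈ S := by
  induction g with
  | nil => intro s t S _ hs x hx; exact hs x (by simpa [bfsInner] using hx)
  | cons c g ih =>
    intro s t S hg hs x hx
    rw [bfsInner_cons] at hx
    by_cases hc : c ∈ s
    · simp only [hc, if_true] at hx
      exact ih s t S (fun a ha => hg a (List.mem_cons_of_mem c ha)) hs x hx
    · simp only [hc, if_false] at hx
      refine ih _ _ S (fun a ha => hg a (List.mem_cons_of_mem c ha)) ?_ x hx
      intro y hy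
      rcases (PySem.Set.mem_add s c y).mp hy with h | rfl
      · exact hs y h
      · exact hg y List.mem_cons_self

theorem inner_nodup (g : List Int) : ∀ (s : PySem.Set Int) (t : List Int),
    s.Nodup → ((bfsInner (s, t) g).1 : List Int).Nodup := by
  induction g with
  | nil => intro s t h; simpa [bfsInner] using h
  | cons c g ih =>
    intro s t h
    rw [bfsInner_cons]
    by_cases hc : c ∈ s
    · simpa [hc] using ih s t h
    · simpa [hc] using ih _ _ (PySem.Set.nodup_add s c h)

theorem inner_measure (g : List Int) : ∀ (U : List Int) (s : PySem.Set Int) (t : List Int),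
    U.Nodup → (∀ c ∈ g, c ∈ U) →
    ((bfsInner (s, t) g).2).length + pvMissing U (bfsInner (s, t) g).1
      ≤ t.length + pvMissing U s := by
  induction g with
  | nil => intro U s t _ _; simp [bfsInner]
  | cons c g ih =>
    intro U s t hU hg
    rw [bfsInner_cons]
    by_cases hc : c ∈ s
    · simpa [hc] using ih U s t hU (fun a ha => hg a (List.mem_cons_of_mem c ha))
    · have hcU : c ∈ U := hg c List.mem_cons_self
      have hmiss := pvMissing_add hU hcU hc
      have := ih U (PySem.Set.add s c) (t ++ [c]) hU
        (fun a ha => hg a (List.mem_cons_of_mem c ha))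
      simp only [hc, if_false]
      simp only [List.length_append, List.length_singleton] at this
      omega

theorem bfsScan_cons (v : Int) (g : List Int) (L : List (List Int))
    (st : PySem.Set Int × List Int) :
    bfsScan (g :: L) v st = bfsScan L v (if v ∈ g then bfsInner st g else st) := by
  simp only [bfsScan, List.foldl_cons]

theorem scan_mono (L : List (List Int)) (v : Int) :
    ∀ (s : PySem.Set Int) (t : List Int) (x : Int),
    x ∈ s → x ∈ (bfsScan L v (s, t)).1 := by
  induction L with
  | nil => intro s t x hx; simpa [bfsScan] using hx
  | cons g L ih =>
    intro s t x hx
    rw [bfsScan_cons]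
    by_cases hv : v ∈ g
    · simp only [hv, if_true]
      have h1 := inner_mono g s t x hx
      rcases hinner : bfsInner (s, t) g with ⟨s', t'⟩
      rw [hinner] at h1
      exact ih s' t' x h1
    · simpa [hv] using ih s t x hx

theorem scan_queue_ext (L : List (List Int)) (v : Int) :
    ∀ (s : PySem.Set Int) (t : List Int), ∃ d, (bfsScan L v (s, t)).2 = t ++ d := by
  induction L with
  | nil => intro s t; exact ⟨[], by simp [bfsScan]⟩
  | cons g L ih =>
    intro s t
    rw [bfsScan_cons]
    by_cases hv : v ∈ g
    · simp only [hv, if_true]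
      rcases hinner : bfsInner (s, t) g with ⟨s', t'⟩
      rcases inner_queue_ext g s t with ⟨d1, hd1⟩
      rw [hinner] at hd1
      have hd1' : t' = t ++ d1 := hd1
      rcases ih s' t' with ⟨d2, hd2⟩
      exact ⟨d1 ++ d2, by rw [hd2, hd1', List.append_assoc]⟩
    · simpa [hv] using ih s t

theorem scan_complete (L : List (List Int)) (v : Int) :
    ∀ (s : PySem.Set Int) (t : List Int) (g : List Int),
    g ∈ L → v ∈ g → ∀ c ∈ g, c ∈ (bfsScan L v (s, t)).1 := by
  induction L with
  | nil => intro s t g hg; cases hg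
  | cons g0 L ih =>
    intro s t g hg hv c hc
    rw [bfsScan_cons]
    rcases List.mem_cons.mp hg with rfl | hg
    · simp only [hv, if_true]
      have h1 := inner_complete g s t c hc
      rcases hinner : bfsInner (s, t) g with ⟨s', t'⟩
      rw [hinner] at h1
      exact scan_mono L v s' t' c h1
    · by_cases hv0 : v ∈ g0
      · simp only [hv0, if_true]
        rcases hinner : bfsInner (s, t) g0 with ⟨s', t'⟩
        exact ih s' t' g hg hv c hc
      · simpa [hv0] using ih s t g hg hv c hc

theorem scan_new_in_queue (L : List (List Int)) (v : Int) :
    ∀ (s : PySem.Set Int) (t : List Int) (x : Int),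
    x ∈ (bfsScan L v (s, t)).1 → x ∈ s ∨ x ∈ (bfsScan L v (s, t)).2 := by
  induction L with
  | nil => intro s t x hx; exact Or.inl (by simpa [bfsScan] using hx)
  | cons g L ih =>
    intro s t x hx
    rw [bfsScan_cons] at hx ⊢
    by_cases hv : v ∈ g
    · simp only [hv, if_true] at hx ⊢
      rcases hinner : bfsInner (s, t) g with ⟨s', t'⟩
      rw [hinner] at hx
      rcases ih s' t' x hx with h | h
      · have h2 := inner_new_in_queue g s t x (by rw [hinner]; exact h)
        rw [hinner] at h2
        rcases h2 with h2 | h2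
        · exact Or.inl h2
        · right
          rcases scan_queue_ext L v s' t' with ⟨d, hd⟩
          rw [hd]; exact List.mem_append.mpr (Or.inl h2)
      · exact Or.inr h
    · simpa [hv] using ih s t x (by simpa [hv] using hx)

theorem scan_queue_sub (L : List (List Int)) (v : Int) :
    ∀ (s : PySem.Set Int) (t : List Int),
    (∀ x ∈ t, x ∈ s) → ∀ x ∈ (bfsScan L v (s, t)).2, x ∈ (bfsScan L v (s, t)).1 := by
  induction L with
  | nil => intro s t h x hx; exact h x (by simpa [bfsScan] using hx)
  | cons g L ih =>
    intro s t h x hx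
    rw [bfsScan_cons] at hx ⊢
    by_cases hv : v ∈ g
    · simp only [hv, if_true] at hx ⊢
      rcases hinner : bfsInner (s, t) g with ⟨s', t'⟩
      refine ih s' t' ?_ x (by rw [hinner] at hx; exact hx)
      intro y hy
      have := inner_queue_sub g s t h y (by rw [hinner]; exact hy)
      rw [hinner] at this; exact this
    · simp only [hv, if_false] at hx ⊢; exact ih s t h x hx

theorem scan_sound (L : List (List Int)) (v : Int) :
    ∀ (s : PySem.Set Int) (t : List Int) (S : List Int),
    v ∈ S → pvClosed L S → (∀ x ∈ s, x ∈ S) → ∀ x ∈ (bfsScan L v (s, t)).1, x ∈ S := by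
  induction L with
  | nil => intro s t S _ _ hs x hx; exact hs x (by simpa [bfsScan] using hx)
  | cons g L ih =>
    intro s t S hvS hcl hs x hx
    rw [bfsScan_cons] at hx
    have hclL : pvClosed L S := fun g' hg' => hcl g' (List.mem_cons_of_mem g hg')
    by_cases hv : v ∈ g
    · simp only [hv, if_true] at hx
      rcases hinner : bfsInner (s, t) g with ⟨s', t'⟩
      rw [hinner] at hx
      refine ih s' t' S hvS hclL ?_ x hx
      intro y hy
      have hgS : ∀ c ∈ g, c ∈ S := hcl g List.mem_cons_self ⟨v, hv, hvS⟩
      have := inner_sound g s t S hgS hs y (by rw [hinner]; exact hy)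
      exact this
    · simp only [hv, if_false] at hx
      exact ih s t S hvS hclL hs x hx

theorem scan_nodup (L : List (List Int)) (v : Int) :
    ∀ (s : PySem.Set Int) (t : List Int),
    s.Nodup → ((bfsScan L v (s, t)).1 : List Int).Nodup := by
  induction L with
  | nil => intro s t h; simpa [bfsScan] using h
  | cons g L ih =>
    intro s t h
    rw [bfsScan_cons]
    by_cases hv : v ∈ g
    · simp only [hv, if_true]
      rcases hinner : bfsInner (s, t) g with ⟨s', t'⟩
      refine ih s' t' ?_
      have := inner_nodup g s t h
      rw [hinner] at this; exact this
    · simpa [hv] using ih s t h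

theorem scan_measure (L : List (List Int)) (v : Int) :
    ∀ (U : List Int) (s : PySem.Set Int) (t : List Int),
    U.Nodup → (∀ g ∈ L, ∀ c ∈ g, c ∈ U) →
    ((bfsScan L v (s, t)).2).length + pvMissing U (bfsScan L v (s, t)).1
      ≤ t.length + pvMissing U s := by
  induction L with
  | nil => intro U s t _ _; simp [bfsScan]
  | cons g L ih =>
    intro U s t hU hL
    rw [bfsScan_cons]
    by_cases hv : v ∈ g
    · simp only [hv, if_true]
      rcases hinner : bfsInner (s, t) g with ⟨s', t'⟩
      have h1 := inner_measure g U s t hU (hL g List.mem_cons_self)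
      rw [hinner] at h1
      have h1' : t'.length + pvMissing U s' ≤ t.length + pvMissing U s := h1
      have h2 := ih U s' t' hU (fun g' hg' => hL g' (List.mem_cons_of_mem g hg'))
      omega
    · simpa [hv] using ih U s t hU (fun g' hg' => hL g' (List.mem_cons_of_mem g hg'))

-- ===== A's loop: invariants =====

theorem loop_mono (vz : List (List Int)) : ∀ (fuel : Nat) (vis : PySem.Set Int)
    (queue : List Int) (x : Int), x ∈ vis → x ∈ bfsLoop vz fuel (vis, queue) := by
  intro fuel
  induction fuel with
  | zero => intro vis queue x hx; simpa [bfsLoop] using hx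
  | succ f ih =>
    intro vis queue x hx
    match queue with
    | [] => simpa [bfsLoop] using hx
    | v :: rest =>
      show x ∈ bfsLoop vz f (bfsScan vz v (vis, rest))
      rcases hscan : bfsScan vz v (vis, rest) with ⟨s', t'⟩
      refine ih s' t' x ?_
      have := scan_mono vz v vis rest x hx
      rw [hscan] at this; exact this

theorem loop_sound (vz : List (List Int)) (S : List Int) (hcl : pvClosed vz S) :
    ∀ (fuel : Nat) (vis : PySem.Set Int) (queue : List Int),
    (∀ x ∈ vis, x ∈ S) → (∀ x ∈ queue, x ∈ vis) →
    ∀ y ∈ bfsLoop vz fuel (vis, queue), y ∈ S := by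
  intro fuel
  induction fuel with
  | zero => intro vis queue hvS _ y hy; exact hvS y (by simpa [bfsLoop] using hy)
  | succ f ih =>
    intro vis queue hvS hqv y hy
    match queue with
    | [] => exact hvS y (by simpa [bfsLoop] using hy)
    | v :: rest =>
      have hy' : y ∈ bfsLoop vz f (bfsScan vz v (vis, rest)) := hy
      rcases hscan : bfsScan vz v (vis, rest) with ⟨s', t'⟩
      rw [hscan] at hy'
      refine ih s' t' ?_ ?_ y hy'
      · intro x hx
        have := scan_sound vz v vis rest S (hvS v (hqv v List.mem_cons_self)) hcl hvS x
          (by rw [hscan]; exact hx)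
        exact this
      · intro x hx
        have := scan_queue_sub vz v vis rest
          (fun z hz => hqv z (List.mem_cons_of_mem v hz)) x (by rw [hscan]; exact hx)
        rw [hscan] at this; exact this

theorem loop_nodup (vz : List (List Int)) : ∀ (fuel : Nat) (vis : PySem.Set Int)
    (queue : List Int), vis.Nodup → (bfsLoop vz fuel (vis, queue) : List Int).Nodup := by
  intro fuel
  induction fuel with
  | zero => intro vis queue h; simpa [bfsLoop] using h
  | succ f ih =>
    intro vis queue h
    match queue with
    | [] => simpa [bfsLoop] using h
    | v :: rest =>
      show (bfsLoop vz f (bfsScan vz v (vis, rest)) : List Int).Nodup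
      rcases hscan : bfsScan vz v (vis, rest) with ⟨s', t'⟩
      refine ih s' t' ?_
      have := scan_nodup vz v vis rest h
      rw [hscan] at this; exact this

theorem loop_closed (vz : List (List Int)) (U : List Int) (hU : U.Nodup)
    (hUall : ∀ g ∈ vz, ∀ c ∈ g, c ∈ U) :
    ∀ (fuel : Nat) (vis : PySem.Set Int) (queue : List Int),
    queue.length + pvMissing U vis ≤ fuel →
    (∀ g ∈ vz, ∀ x ∈ g, x ∈ vis → x ∉ queue → ∀ c ∈ g, c ∈ vis) →
    pvClosed vz (bfsLoop vz fuel (vis, queue)) := by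
  intro fuel
  induction fuel with
  | zero =>
    intro vis queue hm hinv
    have hq : queue = [] := List.length_eq_zero_iff.mp (by omega)
    subst hq
    intro g hg ⟨x, hxg, hxS⟩ c hc
    have hxS' : x ∈ vis := by simpa [bfsLoop] using hxS
    simpa [bfsLoop] using hinv g hg x hxg hxS' (by simp) c hc
  | succ f ih =>
    intro vis queue hm hinv
    match queue with
    | [] =>
      intro g hg ⟨x, hxg, hxS⟩ c hc
      have hxS' : x ∈ vis := by simpa [bfsLoop] using hxS
      simpa [bfsLoop] using hinv g hg x hxg hxS' (by simp) c hc
    | v :: rest =>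
      show pvClosed vz (bfsLoop vz f (bfsScan vz v (vis, rest)))
      rcases hscan : bfsScan vz v (vis, rest) with ⟨s', t'⟩
      refine ih s' t' ?_ ?_
      · have hms := scan_measure vz v U vis rest hU hUall
        rw [hscan] at hms
        have hms' : t'.length + pvMissing U s' ≤ rest.length + pvMissing U vis := hms
        simp only [List.length_cons] at hm
        omega
      · intro g hg x hxg hxs' hxt' c hc
        have hnew := scan_new_in_queue vz v vis rest x (by rw [hscan]; exact hxs')
        rw [hscan] at hnew
        rcases hnew with hxvis | hxq
        · rcases scan_queue_ext vz v vis rest with ⟨d, hd⟩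
          rw [hscan] at hd
          have hd' : t' = rest ++ d := hd
          have hxrest : x ∉ rest := fun h => hxt' (hd' ▸ List.mem_append.mpr (Or.inl h))
          by_cases hxv : x = v
          · subst hxv
            have := scan_complete vz x vis rest g hg hxg c hc
            rw [hscan] at this; exact this
          · have hold := hinv g hg x hxg hxvis
              (by simp [List.mem_cons, hxv, hxrest]) c hc
            have := scan_mono vz v vis rest c hold
            rw [hscan] at this; exact this
        · exact absurd hxq hxt'

-- ===== B's round and loop =====

theorem round_fold_mem (vis : PySem.Set Int) (L : List (List Int)) :
    ∀ (novo : PySem.Set Int) (x : Int),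
    x ∈ L.foldl
      (fun novo g =>
        if PySem.Set.inter vis (PySem.Set.ofList g) = [] then novo
        else PySem.Set.union novo (PySem.Set.ofList g)) novo
    ↔ x ∈ novo ∨ ∃ g ∈ L, (∃ y, y ∈ g ∧ y ∈ vis) ∧ x ∈ g := by
  induction L with
  | nil => intro novo x; simp
  | cons g L ih =>
    intro novo x
    simp only [List.foldl_cons]
    by_cases hg : PySem.Set.inter vis (PySem.Set.ofList g) = []
    · have hng : ¬ ∃ y, y ∈ g ∧ y ∈ vis := by
        rintro ⟨y, hyg, hyv⟩
        have : y ∈ PySem.Set.inter vis (PySem.Set.ofList g) :=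
          (PySem.Set.mem_inter vis (PySem.Set.ofList g) y).mpr
            ⟨hyv, (PySem.Set.mem_ofList g y).mpr hyg⟩
        rw [hg] at this; cases this
      rw [if_pos hg, ih novo x]
      constructor
      · rintro (h | h)
        · exact Or.inl h
        · rcases h with ⟨g', hg', h1, h2⟩
          exact Or.inr ⟨g', List.mem_cons_of_mem g hg', h1, h2⟩
      · rintro (h | ⟨g', hg', h1, h2⟩)
        · exact Or.inl h
        · rcases List.mem_cons.mp hg' with rfl | hg'
          · exact absurd h1 hng
          · exact Or.inr ⟨g', hg', h1, h2⟩
    · have hyes : ∃ y, y ∈ g ∧ y ∈ vis := by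
        rcases List.exists_mem_of_ne_nil _ hg with ⟨y, hy⟩
        rcases (PySem.Set.mem_inter vis (PySem.Set.ofList g) y).mp hy with ⟨h1, h2⟩
        exact ⟨y, (PySem.Set.mem_ofList g y).mp h2, h1⟩
      rw [if_neg hg, ih _ x]
      rw [PySem.Set.mem_union, PySem.Set.mem_ofList]
      constructor
      · rintro ((h | h) | h)
        · exact Or.inl h
        · exact Or.inr ⟨g, List.mem_cons_self, hyes, h⟩
        · rcases h with ⟨g', hg', h1, h2⟩
          exact Or.inr ⟨g', List.mem_cons_of_mem g hg', h1, h2⟩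
      · rintro (h | ⟨g', hg', h1, h2⟩)
        · exact Or.inl (Or.inl h)
        · rcases List.mem_cons.mp hg' with rfl | hg'
          · exact Or.inl (Or.inr h2)
          · exact Or.inr ⟨g', hg', h1, h2⟩

theorem round_mem (vz : List (List Int)) (vis : PySem.Set Int) (hnd : vis.Nodup) (x : Int) :
    x ∈ bfsRound vz vis ↔ x ∈ vis ∨ ∃ g ∈ vz, (∃ y, y ∈ g ∧ y ∈ vis) ∧ x ∈ g := by
  unfold bfsRound
  rw [round_fold_mem, PySem.Set.ofList_eq_self_of_nodup vis hnd]

theorem round_fold_nodup (vis : PySem.Set Int) (L : List (List Int)) :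
    ∀ (novo : PySem.Set Int), novo.Nodup →
    (L.foldl
      (fun novo g =>
        if PySem.Set.inter vis (PySem.Set.ofList g) = [] then novo
        else PySem.Set.union novo (PySem.Set.ofList g)) novo : List Int).Nodup := by
  induction L with
  | nil => intro novo h; simpa using h
  | cons g L ih =>
    intro novo h
    simp only [List.foldl_cons]
    by_cases hg : PySem.Set.inter vis (PySem.Set.ofList g) = []
    · rw [if_pos hg]; exact ih novo h
    · rw [if_neg hg]; exact ih _ (PySem.Set.nodup_union _ _ h)

theorem round_nodup (vz : List (List Int)) (vis : PySem.Set Int) :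
    (bfsRound vz vis : List Int).Nodup := by
  unfold bfsRound
  exact round_fold_nodup vis vz _ (PySem.Set.nodup_ofList vis)

theorem round_mono (vz : List (List Int)) (vis : PySem.Set Int) (hnd : vis.Nodup)
    (x : Int) (hx : x ∈ vis) : x ∈ bfsRound vz vis :=
  (round_mem vz vis hnd x).mpr (Or.inl hx)

-- |vis| = |round vis| forces the round to be a fixpoint, hence vis closed
theorem round_len_eq_closed (vz : List (List Int)) (vis : PySem.Set Int) (hnd : vis.Nodup)
    (hlen : (bfsRound vz vis : List Int).length = (vis : List Int).length) :
    pvClosed vz vis := by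
  have hsub : (vis : List Int) ⊆ bfsRound vz vis :=
    fun x hx => round_mono vz vis hnd x hx
  have hperm : (vis : List Int).Perm (bfsRound vz vis) :=
    (List.subperm_of_subset hnd hsub).perm_of_length_le (le_of_eq hlen)
  intro g hg ⟨y, hyg, hyv⟩ c hc
  have hcr : c ∈ bfsRound vz vis :=
    (round_mem vz vis hnd c).mpr (Or.inr ⟨g, hg, ⟨y, hyg, hyv⟩, hc⟩)
  exact hperm.mem_iff.mpr hcr

theorem countP_lt_of_witness (p q : List Int → Bool) :
    ∀ (L : List (List Int)), (∀ a ∈ L, q a = true → p a = true) →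
    ∀ g ∈ L, p g = true → q g = false → L.countP q < L.countP p := by
  intro L
  induction L with
  | nil => intro _ g hg; cases hg
  | cons a L ih =>
    intro himp g hg hp hq
    have himpL : ∀ b ∈ L, q b = true → p b = true :=
      fun b hb => himp b (List.mem_cons_of_mem a hb)
    have hle : L.countP q ≤ L.countP p := List.countP_mono_left himpL
    rcases List.mem_cons.mp hg with rfl | hg
    · simp [hp, hq]
      omega
    · have hlt := ih himpL g hg hp hq
      have hqp : (if q a = true then 1 else 0) ≤ (if p a = true then 1 else 0) := by
        by_cases hqa : q a = true
        · simp [hqa, himp a List.mem_cons_self hqa]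
        · simp [hqa]
      simp only [List.countP_cons]
      omega

theorem altLoop_mono (vz : List (List Int)) : ∀ (k : Nat) (vis : PySem.Set Int),
    vis.Nodup → ∀ x ∈ vis, x ∈ bfsAltLoop vz k vis := by
  intro k
  induction k with
  | zero => intro vis _ x hx; simpa [bfsAltLoop] using hx
  | succ k ih =>
    intro vis hnd x hx
    show x ∈ (if PySem.Set.len (bfsRound vz vis) = PySem.Set.len vis then vis
      else bfsAltLoop vz k (bfsRound vz vis))
    by_cases h : PySem.Set.len (bfsRound vz vis) = PySem.Set.len vis
    · rw [if_pos h]; exact hx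
    · rw [if_neg h]
      exact ih (bfsRound vz vis) (round_nodup vz vis) x (round_mono vz vis hnd x hx)

theorem altLoop_nodup (vz : List (List Int)) : ∀ (k : Nat) (vis : PySem.Set Int),
    vis.Nodup → (bfsAltLoop vz k vis : List Int).Nodup := by
  intro k
  induction k with
  | zero => intro vis h; simpa [bfsAltLoop] using h
  | succ k ih =>
    intro vis hnd
    show (( if PySem.Set.len (bfsRound vz vis) = PySem.Set.len vis then vis
      else bfsAltLoop vz k (bfsRound vz vis)) : List Int).Nodup
    by_cases h : PySem.Set.len (bfsRound vz vis) = PySem.Set.len vis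
    · rw [if_pos h]; exact hnd
    · rw [if_neg h]
      exact ih (bfsRound vz vis) (round_nodup vz vis)

theorem altLoop_sound (vz : List (List Int)) (S : List Int) (hcl : pvClosed vz S) :
    ∀ (k : Nat) (vis : PySem.Set Int), vis.Nodup → (∀ x ∈ vis, x ∈ S) →
    ∀ y ∈ bfsAltLoop vz k vis, y ∈ S := by
  intro k
  induction k with
  | zero => intro vis _ hvS y hy; exact hvS y (by simpa [bfsAltLoop] using hy)
  | succ k ih =>
    intro vis hnd hvS y hy
    have hy' : y ∈ (if PySem.Set.len (bfsRound vz vis) = PySem.Set.len vis then vis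
      else bfsAltLoop vz k (bfsRound vz vis)) := hy
    by_cases h : PySem.Set.len (bfsRound vz vis) = PySem.Set.len vis
    · rw [if_pos h] at hy'; exact hvS y hy'
    · rw [if_neg h] at hy'
      refine ih (bfsRound vz vis) (round_nodup vz vis) ?_ y hy'
      intro x hx
      rcases (round_mem vz vis hnd x).mp hx with hxv | ⟨g, hg, hgt, hxg⟩
      · exact hvS x hxv
      · rcases hgt with ⟨z, hzg, hzv⟩
        exact hcl g hg ⟨z, hzg, hvS z hzv⟩ x hxg

theorem altLoop_closed (vz : List (List Int)) : ∀ (k : Nat) (vis : PySem.Set Int),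
    vis.Nodup → vz.countP (fun g => !decide (∀ c ∈ g, c ∈ vis)) ≤ k →
    pvClosed vz (bfsAltLoop vz k vis) := by
  intro k
  induction k with
  | zero =>
    intro vis _ hcnt
    have h0 : vz.countP (fun g => !decide (∀ c ∈ g, c ∈ vis)) = 0 := Nat.le_zero.mp hcnt
    have hall := List.countP_eq_zero.mp h0
    intro g hg _ c hc
    have hsub : ∀ c ∈ g, c ∈ vis := by
      have h' := hall g hg
      simpa using h'
    simpa [bfsAltLoop] using hsub c hc
  | succ k ih =>
    intro vis hnd hcnt
    show pvClosed vz (if PySem.Set.len (bfsRound vz vis) = PySem.Set.len vis then vis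
      else bfsAltLoop vz k (bfsRound vz vis))
    by_cases h : PySem.Set.len (bfsRound vz vis) = PySem.Set.len vis
    · rw [if_pos h]
      refine round_len_eq_closed vz vis hnd ?_
      simpa [PySem.Set.len] using h
    · rw [if_neg h]
      refine ih (bfsRound vz vis) (round_nodup vz vis) ?_
      -- the round strictly grew: some group is newly absorbed, the count drops
      have hlen : (bfsRound vz vis : List Int).length ≠ (vis : List Int).length := by
        intro he; exact h (by simp [PySem.Set.len, he])
      have hnew : ∃ x ∈ bfsRound vz vis, x ∉ vis := by
        by_contra hn
        push Not at hn
        have hperm : ((bfsRound vz vis : List Int)).Perm vis :=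
          (List.perm_ext_iff_of_nodup (round_nodup vz vis) hnd).mpr
            (fun a => ⟨fun ha => hn a ha, fun ha => round_mono vz vis hnd a ha⟩)
        exact hlen hperm.length_eq
      rcases hnew with ⟨x, hxr, hxv⟩
      rcases (round_mem vz vis hnd x).mp hxr with h' | ⟨g, hg, hgt, hxg⟩
      · exact absurd h' hxv
      have hgr : ∀ c ∈ g, c ∈ bfsRound vz vis :=
        fun c hc => (round_mem vz vis hnd c).mpr (Or.inr ⟨g, hg, hgt, hc⟩)
      have hlt := countP_lt_of_witness
        (fun g => !decide (∀ c ∈ g, c ∈ vis))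
        (fun g => !decide (∀ c ∈ g, c ∈ bfsRound vz vis)) vz
        (by
          intro a _ hq
          simp only [Bool.not_eq_true', decide_eq_false_iff_not] at hq ⊢
          intro hsub
          exact hq (fun c hc => round_mono vz vis hnd c (hsub c hc)))
        g hg
        (by
          simp only [Bool.not_eq_true', decide_eq_false_iff_not]
          intro hsub; exact hxv (hsub x hxg))
        (by
          simp only [Bool.not_eq_false', decide_eq_true_iff]
          exact hgr)
      omega

-- ===== assembly =====

theorem ofList_single (o : Int) : PySem.Set.ofList [o] = [o] :=
  PySem.Set.ofList_eq_self_of_nodup [o] (by simp)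

theorem bfs_final_props (o : Int) (vz : List (List Int)) :
    o ∈ bfsLoop vz (vz.flatten.length + 1) (PySem.Set.ofList [o], [o]) ∧
    pvClosed vz (bfsLoop vz (vz.flatten.length + 1) (PySem.Set.ofList [o], [o])) ∧
    (bfsLoop vz (vz.flatten.length + 1) (PySem.Set.ofList [o], [o]) : List Int).Nodup := by
  rw [ofList_single]
  refine ⟨loop_mono vz _ [o] [o] o (by simp), ?_, loop_nodup vz _ [o] [o] (by simp)⟩
  refine loop_closed vz (PySem.Set.ofList vz.flatten) (PySem.Set.nodup_ofList _)
    (fun g hg c hc => (PySem.Set.mem_ofList _ c).mpr (List.mem_flatten.mpr ⟨g, hg, hc⟩))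
    _ [o] [o] ?_ ?_
  · have h1 : pvMissing (PySem.Set.ofList vz.flatten) [o]
        ≤ (PySem.Set.ofList vz.flatten : List Int).length := List.countP_le_length
    have h2 := PySem.Set.length_ofList_le vz.flatten
    simp only [List.length_cons, List.length_nil]
    omega
  · intro g hg x hxg hxv hxq
    simp only [List.mem_singleton] at hxv
    exact absurd (hxv ▸ List.mem_singleton.mpr rfl) (hxv ▸ hxq)

theorem bfs_alt_final_props (o : Int) (vz : List (List Int)) :
    o ∈ bfsAltLoop vz vz.length (PySem.Set.ofList [o]) ∧
    pvClosed vz (bfsAltLoop vz vz.length (PySem.Set.ofList [o])) ∧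
    (bfsAltLoop vz vz.length (PySem.Set.ofList [o]) : List Int).Nodup := by
  rw [ofList_single]
  refine ⟨altLoop_mono vz _ [o] (by simp) o (by simp), ?_,
    altLoop_nodup vz _ [o] (by simp)⟩
  exact altLoop_closed vz vz.length [o] (by simp) List.countP_le_length

-- ===== VERDICT (by name: the statement is the Claim_ definition above) =====
theorem bfs_spec : Claim_equal_bfs := by
  intro o vz _
  unfold Spec_bfs bfs bfs_alt
  obtain ⟨hoA, hclA, hndA⟩ := bfs_final_props o vz
  obtain ⟨hoB, hclB, hndB⟩ := bfs_alt_final_props o vz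
  rw [ofList_single] at hoA hclA hndA hoB hclB hndB ⊢
  have hAB := loop_sound vz _ hclB (vz.flatten.length + 1) [o] [o]
      (fun x hx => by rw [List.mem_singleton.mp hx]; exact hoB)
      (fun x hx => hx)
  have hBA := altLoop_sound vz _ hclA vz.length [o] (by simp)
      (fun x hx => by rw [List.mem_singleton.mp hx]; exact hoA)
  have hperm := (List.perm_ext_iff_of_nodup hndA hndB).mpr
    (fun a => ⟨fun h => hAB a h, fun h => hBA a h⟩)
  simp only [PySem.Set.len, hperm.length_eq]
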